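-- pv_equiv track=rewrite | github.com/Masudhaji2002/Mikiro | test_model.py | fix_subword_labels
-- ===== SOURCE A (Python) =====
-- def fix_subword_labels(tokens, predicted_labels):
--     fixed_labels = []
--     prev_label = "O"
--     for token, label in zip(tokens, predicted_labels):
--         if token.startswith("##"):
--             if prev_label == "B-TERM":
--                 fixed_labels.append("I-TERM")
--             else:
--                 fixed_labels.append(prev_label)
--         else:
--             fixed_labels.append(label)
--             prev_label = label
--     return fixed_labels
-- ===== SOURCE B (Python) =====
-- def fix_subword_labels(tokens, predicted_labels):
--     # Pass 1: group tokens into words: each group is (head_label_or_None, n_continuations).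
--     # A group with head None covers leading '##' tokens that appear before any word head.
--     groups = []
--     for token, label in zip(tokens, predicted_labels):
--         if token.startswith("##"):
--             if groups:
--                 head, n = groups[-1]
--                 groups[-1] = (head, n + 1)
--             else:
--                 groups.append((None, 1))
--         else:
--             groups.append((label, 0))
--     # Pass 2: flatten: head label for the head token, continuation label for '##' tokens.
--     out = []
--     for head, n in groups:
--         if head is None:
--             cont = "O"
--         else:
--             out.append(head)
--             cont = "I-TERM" if head == "B-TERM" else head
--         out.extend([cont] * n)
--     return out
-- ===== Notes on version B (the rewrite author's own statement) =====
-- stated objective: alternative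
-- what changed: Replaces the single stateful loop carrying prev_label with a two-pass word-grouping decomposition: first group tokens into words headed by each non-'##' token (leading '##' tokens form a headless group), then flatten groups emitting the head label and derived continuation labels.
import Mathlib
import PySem

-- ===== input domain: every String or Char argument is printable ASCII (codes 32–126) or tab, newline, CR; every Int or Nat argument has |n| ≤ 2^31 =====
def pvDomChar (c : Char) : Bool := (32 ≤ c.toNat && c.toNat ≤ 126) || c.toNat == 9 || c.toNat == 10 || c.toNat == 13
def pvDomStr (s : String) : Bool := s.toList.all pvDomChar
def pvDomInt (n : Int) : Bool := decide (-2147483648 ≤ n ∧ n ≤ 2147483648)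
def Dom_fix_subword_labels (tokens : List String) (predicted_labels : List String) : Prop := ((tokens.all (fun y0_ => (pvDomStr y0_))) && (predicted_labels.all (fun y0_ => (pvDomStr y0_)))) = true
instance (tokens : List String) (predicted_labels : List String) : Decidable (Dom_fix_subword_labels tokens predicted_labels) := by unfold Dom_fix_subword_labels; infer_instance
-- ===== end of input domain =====

-- ===== PORT A =====
-- A: one flat loop over zip(tokens, predicted_labels) carrying prev_label.
def fix_subword_labels (tokens : List String) (predicted_labels : List String) : List String :=
  ((List.zip tokens predicted_labels).foldl
    (fun (st : List String × String) (tl : String × String) =>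
      if PySem.Str.startswith tl.1 "##" then
        if st.2 == "B-TERM" then (st.1 ++ ["I-TERM"], st.2)
        else (st.1 ++ [st.2], st.2)
      else (st.1 ++ [tl.2], tl.2))
    ([], "O")).1

-- ===== PORT B =====
-- B: two-pass word-grouping decomposition (alternative structure; return value proved equal).
-- Pass-1 helper: increment the continuation count of the LAST group (Python: groups[-1] = (head, n+1)).
def pvIncLast : List (Option String × Nat) → List (Option String × Nat)
  | [] => []
  | [g] => [(g.1, g.2 + 1)]
  | g :: gs => g :: pvIncLast gs

def fix_subword_labels_alt (tokens : List String) (predicted_labels : List String) : List String :=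
  let groups := (List.zip tokens predicted_labels).foldl
    (fun (groups : List (Option String × Nat)) (tl : String × String) =>
      if PySem.Str.startswith tl.1 "##" then
        match groups with
        | [] => [(none, 1)]
        | _ => pvIncLast groups
      else groups ++ [(some tl.2, 0)])
    []
  groups.foldl
    (fun (out : List String) (g : Option String × Nat) =>
      match g.1 with
      | none => out ++ List.replicate g.2 "O"
      | some h => (out ++ [h]) ++ List.replicate g.2 (if h == "B-TERM" then "I-TERM" else h))
    []

-- ===== PRECONDITION & SPEC =====
def Spec_fix_subword_labels (tokens : List String) (predicted_labels : List String) (out : List String) : Prop := out = fix_subword_labels_alt tokens predicted_labels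
instance (tokens : List String) (predicted_labels : List String) (out : List String) : Decidable (Spec_fix_subword_labels tokens predicted_labels out) := by unfold Spec_fix_subword_labels; infer_instance

-- ===== CLAIM (what is proved, stated in full; the proofs are below) =====
def Claim_equal_fix_subword_labels : Prop := ∀ (tokens : List String) (predicted_labels : List String), Dom_fix_subword_labels tokens predicted_labels → Spec_fix_subword_labels tokens predicted_labels (fix_subword_labels tokens predicted_labels)

-- ===== LEMMAS AND PROOFS =====

-- Reference recursion: what A emits given the running prev label.
def pvSpecRec (prev : String) : List (String × String) → List String
  | [] => []
  | (t, l) :: rest =>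
    if PySem.Str.startswith t "##" then
      (if prev == "B-TERM" then "I-TERM" else prev) :: pvSpecRec prev rest
    else l :: pvSpecRec l rest

theorem pvA_foldl (ps : List (String × String)) :
    ∀ (acc : List String) (prev : String),
      (ps.foldl (fun (st : List String × String) (tl : String × String) =>
        if PySem.Str.startswith tl.1 "##" then
          if st.2 == "B-TERM" then (st.1 ++ ["I-TERM"], st.2)
          else (st.1 ++ [st.2], st.2)
        else (st.1 ++ [tl.2], tl.2)) (acc, prev)).1 = acc ++ pvSpecRec prev ps := by
  induction ps with
  | nil => intro acc prev; simp [pvSpecRec]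
  | cons p rest ih =>
    intro acc prev
    obtain ⟨t, l⟩ := p
    simp only [List.foldl_cons]
    by_cases h : PySem.Chars.startswith t.toList ['#', '#'] = true
    · have hS : PySem.Str.startswith t "##" = true := by simpa using h
      rw [if_pos hS]
      by_cases hb : prev = "B-TERM"
      · rw [if_pos (by simp [hb]), ih]
        simp [pvSpecRec, h, hb]
      · rw [if_neg (by simp [hb]), ih]
        simp [pvSpecRec, h, hb]
    · rw [if_neg (by simpa using h), ih]
      simp [pvSpecRec, h]

-- B-side: what a group contributes to the flattened output.
def pvEmit (g : Option String × Nat) : List String :=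
  match g.1 with
  | none => List.replicate g.2 "O"
  | some h => h :: List.replicate g.2 (if h == "B-TERM" then "I-TERM" else h)

-- The continuation label implied by the last group of a group list ("O" if none).
def pvPrevOf (gs : List (Option String × Nat)) : String :=
  match gs.getLast? with
  | none => "O"
  | some g => match g.1 with
    | none => "O"
    | some s => s

theorem pvFlatten_eq (gs : List (Option String × Nat)) :
    ∀ (acc : List String),
      gs.foldl (fun (out : List String) (g : Option String × Nat) =>
        match g.1 with
        | none => out ++ List.replicate g.2 "O"
        | some h => (out ++ [h]) ++ List.replicate g.2 (if h == "B-TERM" then "I-TERM" else h))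
        acc = acc ++ gs.flatMap pvEmit := by
  induction gs with
  | nil => intro acc; simp
  | cons g gs ih =>
    intro acc
    rw [List.foldl_cons, ih]
    obtain ⟨h, n⟩ := g
    cases h <;> simp [pvEmit]

theorem pvIncLast_flatMap (gs : List (Option String × Nat)) (hne : gs ≠ []) :
    (pvIncLast gs).flatMap pvEmit
      = gs.flatMap pvEmit ++ [if pvPrevOf gs == "B-TERM" then "I-TERM" else pvPrevOf gs] := by
  induction gs with
  | nil => exact absurd rfl hne
  | cons g gs ih =>
    cases gs with
    | nil =>
      obtain ⟨h, n⟩ := g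
      cases h <;> simp [pvIncLast, pvEmit, pvPrevOf, List.replicate_succ']
    | cons g' gs' =>
      have h1 : pvIncLast (g :: g' :: gs') = g :: pvIncLast (g' :: gs') := rfl
      rw [h1]
      simp only [List.flatMap_cons, ih (by simp)]
      have h2 : pvPrevOf (g :: g' :: gs') = pvPrevOf (g' :: gs') := by
        simp [pvPrevOf, List.getLast?_cons_cons]
      rw [h2]
      simp [List.append_assoc]

theorem pvPrevOf_incLast (gs : List (Option String × Nat)) :
    pvPrevOf (pvIncLast gs) = pvPrevOf gs := by
  induction gs with
  | nil => rfl
  | cons g gs ih =>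
    cases gs with
    | nil => obtain ⟨h, n⟩ := g; cases h <;> rfl
    | cons g' gs' =>
      have h1 : pvIncLast (g :: g' :: gs') = g :: pvIncLast (g' :: gs') := rfl
      have h2 : pvIncLast (g' :: gs') ≠ [] := by
        cases gs' with
        | nil => simp [pvIncLast]
        | cons a b => simp [pvIncLast]
      rw [h1]
      cases hI : pvIncLast (g' :: gs') with
      | nil => exact absurd hI h2
      | cons x xs =>
        have h3 := ih
        rw [hI] at h3
        simpa [pvPrevOf, List.getLast?_cons_cons] using h3

theorem pvMain (ps : List (String × String)) :
    ∀ (gs : List (Option String × Nat)),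
      ((ps.foldl
        (fun (groups : List (Option String × Nat)) (tl : String × String) =>
          if PySem.Str.startswith tl.1 "##" then
            match groups with
            | [] => [(none, 1)]
            | _ => pvIncLast groups
          else groups ++ [(some tl.2, 0)]) gs).flatMap pvEmit)
        = gs.flatMap pvEmit ++ pvSpecRec (pvPrevOf gs) ps := by
  induction ps with
  | nil => intro gs; simp [pvSpecRec]
  | cons p rest ih =>
    intro gs
    obtain ⟨t, l⟩ := p
    simp only [List.foldl_cons]
    by_cases h : PySem.Chars.startswith t.toList ['#', '#'] = true
    · have hS : PySem.Str.startswith t "##" = true := by simpa using h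
      rw [if_pos hS]
      cases gs with
      | nil =>
        rw [ih]
        simp [pvSpecRec, pvEmit, pvPrevOf, h]
      | cons g gs' =>
        rw [ih]
        have hm : (match g :: gs' with
            | ([] : List (Option String × Nat)) => [((none : Option String), 1)]
            | _ => pvIncLast (g :: gs')) = pvIncLast (g :: gs') := rfl
        rw [hm, pvPrevOf_incLast, pvIncLast_flatMap (g :: gs') (by simp)]
        simp [pvSpecRec, h, List.append_assoc]
    · rw [if_neg (by simpa using h), ih]
      have hp : pvPrevOf (gs ++ [(some l, 0)]) = l := by
        simp [pvPrevOf, List.getLast?_append]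
      rw [hp]
      simp [pvSpecRec, h, pvEmit, List.append_assoc]

-- ===== VERDICT (by name: the statement is the Claim_ definition above) =====
theorem fix_subword_labels_spec : Claim_equal_fix_subword_labels := by
  intro tokens predicted_labels _
  unfold Spec_fix_subword_labels fix_subword_labels fix_subword_labels_alt
  rw [pvA_foldl, pvFlatten_eq, pvMain]
  simp [pvPrevOf]
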